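-- pv_equiv track=rewrite | github.com/andresperez777/Universidad-de-Antioquia-UdeA-MinTIC2022 | retos Misión TIC 2022 Python/Otros retos/encriptar.py | desencriptar
-- ===== SOURCE A (Python) =====
-- def desencriptar(encriptado,clave):
--     lista_desencriptar = []
--     nueva_clave = {}
--     encriptado = list(encriptado)  # converir mensaje encriptado a una lista
--
--     #  Invertir diccionario
--     for k, v in clave.items():
--         nueva_clave[v] = k
--
--     # Desencriptar el mensaje
--     for i in range(len(encriptado)):
--         letra_encriptado = encriptado[i]
--         nuevo_valor = nueva_clave[letra_encriptado]
--         lista_desencriptar.append(nuevo_valor)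
--
--     desencriptado=''.join(lista_desencriptar)
--
--     return desencriptado
-- ===== SOURCE B (Python) =====
-- def desencriptar(encriptado, clave):
--     # For each ciphertext character, find the key whose value encodes it.
--     return ''.join(next(k for k, v in clave.items() if v == c) for c in encriptado)
-- ===== Notes on version B (the rewrite author's own statement) =====
-- stated objective: simpler
-- what changed: B builds no inverted dictionary: for each character it searches clave.items() for the (first) key encoding it; Pre_ excludes inputs where some message character is encoded by more than one key, on which A's dict-reinversion accidentally keeps the last pair while B's search finds the first, and inputs where a character is encoded by no key (A raises KeyError).
-- outside the precondition, e.g. on desencriptar('a', {'x': 'a', 'z': 'a'}): A returns 'z', B returns 'x'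
import Mathlib
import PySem

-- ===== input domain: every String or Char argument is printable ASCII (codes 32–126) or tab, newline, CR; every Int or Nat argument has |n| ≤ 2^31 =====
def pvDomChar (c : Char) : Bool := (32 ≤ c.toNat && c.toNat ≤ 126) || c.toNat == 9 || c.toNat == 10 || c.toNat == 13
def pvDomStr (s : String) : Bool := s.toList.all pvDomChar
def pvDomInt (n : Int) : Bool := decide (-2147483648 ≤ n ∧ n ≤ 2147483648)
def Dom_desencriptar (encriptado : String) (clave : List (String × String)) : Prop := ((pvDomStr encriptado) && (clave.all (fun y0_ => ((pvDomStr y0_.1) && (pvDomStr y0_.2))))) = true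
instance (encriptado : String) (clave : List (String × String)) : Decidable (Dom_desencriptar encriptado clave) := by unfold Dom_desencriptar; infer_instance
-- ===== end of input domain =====

-- B skips the dictionary inversion and instead searches clave for each character's key (simpler decomposition; Pre_ excludes ambiguous/unmatched characters).


-- ===== PORT A =====
-- for k, v in clave.items(): nueva_clave[v] = k   (dict inversion; on duplicate values the later pair overwrites)
def pvInvert (clave : List (String × String)) : PySem.Dict String String :=
  clave.foldl (fun d p => d.insert p.2 p.1) PySem.Dict.empty

-- Literal port of A: invert the dict, then loop over the characters appending
-- nueva_clave[c].  The dict lookup raises KeyError when c has no preimage;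
-- Pre_desencriptar excludes those inputs, so the ".getD \"\"" default never fires inside Pre_.
def desencriptar (encriptado : String) (clave : List (String × String)) : String :=
  let nueva_clave := pvInvert clave
  let lista_desencriptar :=
    encriptado.toList.foldl
      (fun acc c => acc ++ [(nueva_clave.get? (String.ofList [c])).getD ""]) []
  PySem.Str.join "" lista_desencriptar

-- ===== PORT B =====
-- Port of B: per character, first pair of clave whose value is that character
-- (next(k for k, v in clave.items() if v == c) = List.find?; it raises when no
-- pair matches — excluded by Pre_, so the ".getD \"\"" default never fires inside Pre_).
def desencriptar_alt (encriptado : String) (clave : List (String × String)) : String :=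
  PySem.Str.join ""
    (encriptado.toList.map
      (fun c => ((clave.find? (fun p => p.2 == String.ofList [c])).map Prod.fst).getD ""))

-- ===== PRECONDITION & SPEC =====
-- Pre_ excludes the inputs where A raises KeyError (a message character encoded by no key)
-- and the defensible corner where a message character is encoded by MORE THAN ONE key,
-- on which A's dict-inversion order (last pair wins) and B's search (first pair) are both
-- accidental choices: each character of encriptado must match exactly one pair's value.
def Pre_desencriptar (encriptado : String) (clave : List (String × String)) : Prop :=
  (encriptado.toList.all
    (fun c => clave.countP (fun p => p.2 == String.ofList [c]) == 1)) = true
instance (encriptado : String) (clave : List (String × String)) : Decidable (Pre_desencriptar encriptado clave) := by unfold Pre_desencriptar; infer_instance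

def pvWitness_desencriptar : String × (List (String × String)) := ("aba", [("x", "a"), ("y", "b")])

def Spec_desencriptar (encriptado : String) (clave : List (String × String)) (out : String) : Prop := out = desencriptar_alt encriptado clave
instance (encriptado : String) (clave : List (String × String)) (out : String) : Decidable (Spec_desencriptar encriptado clave out) := by unfold Spec_desencriptar; infer_instance

-- ===== CLAIM (what is proved, stated in full; the proofs are below) =====
def Claim_equal_desencriptar : Prop := ∀ (encriptado : String) (clave : List (String × String)), Dom_desencriptar encriptado clave → Pre_desencriptar encriptado clave → Spec_desencriptar encriptado clave (desencriptar encriptado clave)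

-- ===== LEMMAS AND PROOFS =====

-- Looking up c in A's inverted dict is a last-match scan over clave.
theorem pvInvert_get?_eq_last (clave : List (String × String)) (c : String) :
    (pvInvert clave).get? c =
      clave.foldl (fun acc p => if p.2 == c then some p.1 else acc) none := by
  unfold pvInvert
  suffices h : ∀ (l : List (String × String)) (d : PySem.Dict String String),
      (l.foldl (fun d p => d.insert p.2 p.1) d).get? c =
      l.foldl (fun acc p => if p.2 == c then some p.1 else acc) (d.get? c) by
    simpa using h clave PySem.Dict.empty
  intro l
  induction l with
  | nil => intro d; simp
  | cons p t ih =>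
    intro d
    simp only [List.foldl_cons, ih]
    congr 1
    by_cases hvc : p.2 = c
    · subst hvc; simp [PySem.Dict.get?_insert_self]
    · simp only [beq_iff_eq, hvc, if_false, PySem.Dict.get?_insert_of_ne _ _ (Ne.symm hvc)]

-- With no match in the list the last-match scan keeps its accumulator.
theorem last_of_countP_zero (c : String) (l : List (String × String))
    (h : l.countP (fun p => p.2 == c) = 0) (acc : Option String) :
    l.foldl (fun acc p => if p.2 == c then some p.1 else acc) acc = acc := by
  induction l generalizing acc with
  | nil => rfl
  | cons p t ih =>
    rw [List.countP_cons] at h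
    by_cases hp : (p.2 == c) = true
    · simp [hp] at h
    · simp only [List.foldl_cons, hp]
      exact ih (by omega) acc

-- When exactly one pair matches, the last match is the first match.
theorem last_eq_find?_of_countP_one (c : String) (l : List (String × String))
    (h : l.countP (fun p => p.2 == c) = 1) :
    l.foldl (fun acc p => if p.2 == c then some p.1 else acc) none =
      (l.find? (fun p => p.2 == c)).map Prod.fst := by
  induction l with
  | nil => simp at h
  | cons p t ih =>
    rw [List.countP_cons] at h
    cases hp : (p.2 == c) with
    | true =>
      rw [hp] at h
      simp only [List.foldl_cons, hp, if_true, List.find?_cons, Option.map_some]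
      exact last_of_countP_zero c t (by rw [if_pos rfl] at h; omega) (some p.1)
    | false =>
      rw [hp] at h
      simp only [List.foldl_cons, hp, List.find?_cons, Bool.false_eq_true, if_false]
      exact ih (by simpa using h)

-- ===== VERDICT (by name: the statement is the Claim_ definition above) =====
theorem desencriptar_spec : Claim_equal_desencriptar := by
  intro encriptado clave _ hpre
  unfold Spec_desencriptar desencriptar desencriptar_alt
  simp only []
  rw [PySem.List.foldl_append_singleton_eq_map]
  simp only [List.nil_append]
  congr 1
  apply List.map_congr_left
  intro c hc
  unfold Pre_desencriptar at hpre
  rw [List.all_eq_true] at hpre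
  have h1 := hpre c hc
  rw [beq_iff_eq] at h1
  rw [pvInvert_get?_eq_last, last_eq_find?_of_countP_one _ _ h1]
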